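-- pv_equiv track=rewrite | github.com/jkarnik/Topology-Maps | server/config_collector/diff_engine.py | _get_identity_key
-- ===== SOURCE A (Python) =====
-- _IDENTITY_KEYS: dict[str, str | None] = {
--     "appliance_vlans": "id",
--     "appliance_firewall_l3": None,   # None = position-based
--     "wireless_ssids": "number",
--     "switch_device_ports": "portId",
-- }
--
-- def _get_identity_key(area_name: str, sample_row: dict) -> str | None:
--     if area_name in _IDENTITY_KEYS:
--         return _IDENTITY_KEYS[area_name]
--     # Fallback: first field ending in Id, id, or number
--     for suffix in ("Id", "id", "number"):
--         for k in sample_row: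
--             if k.endswith(suffix):
--                 return k
--     return None  # position fallback
-- ===== SOURCE B (Python) =====
-- _IDENTITY_KEYS: dict[str, str | None] = {
--     "appliance_vlans": "id",
--     "appliance_firewall_l3": None,   # None = position-based
--     "wireless_ssids": "number",
--     "switch_device_ports": "portId",
-- }
--
-- def _get_identity_key(area_name: str, sample_row: dict) -> str | None:
--     if area_name in _IDENTITY_KEYS:
--         return _IDENTITY_KEYS[area_name]
--     # One pass: index each suffix by the first key that ends with it,
--     # then pick by suffix priority.
--     index = {}
--     for k in sample_row:
--         for suffix in ("Id", "id", "number"):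
--             if k.endswith(suffix):
--                 index.setdefault(suffix, k)
--     for suffix in ("Id", "id", "number"):
--         if suffix in index:
--             return index[suffix]
--     return None  # position fallback
-- ===== Notes on version B (the rewrite author's own statement) =====
-- stated objective: alternative
-- what changed: Replaces A's suffix-outer/row-inner nested rescan with a single pass over sample_row that builds a suffix->first-matching-key index, followed by a priority-order selection over the three suffixes.
import Mathlib
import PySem

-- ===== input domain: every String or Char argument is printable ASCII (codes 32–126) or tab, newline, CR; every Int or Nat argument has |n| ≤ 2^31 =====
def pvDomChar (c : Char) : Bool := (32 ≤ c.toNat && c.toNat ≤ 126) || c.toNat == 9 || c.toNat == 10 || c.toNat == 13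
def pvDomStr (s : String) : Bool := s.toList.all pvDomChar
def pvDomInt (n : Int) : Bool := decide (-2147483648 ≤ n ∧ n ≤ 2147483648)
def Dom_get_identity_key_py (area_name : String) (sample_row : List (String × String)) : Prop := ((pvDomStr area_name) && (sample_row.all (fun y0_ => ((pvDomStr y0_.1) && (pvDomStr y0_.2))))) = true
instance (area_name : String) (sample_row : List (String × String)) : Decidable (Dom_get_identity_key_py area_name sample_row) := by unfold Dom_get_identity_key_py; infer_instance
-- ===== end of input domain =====

-- B replaces A's suffix-outer/row-inner nested scans by one pass over sample_row
-- building a suffix->first-key index, then a priority-order selection (alternative decomposition).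


-- ===== PORT A =====
-- module constant _IDENTITY_KEYS (dict[str, Optional[str]])
def identityKeys : PySem.Dict String (Option String) :=
  PySem.Dict.ofList [("appliance_vlans", some "id"), ("appliance_firewall_l3", none),
    ("wireless_ssids", some "number"), ("switch_device_ports", some "portId")]

-- A's fallback: for suffix in (...): for k in sample_row: if k.endswith(suffix): return k
def aFallback : List String → List (String × String) → Option String
  | [], _ => none
  | s :: rest, row =>
    match row.find? (fun kv => PySem.Str.endswith kv.1 s) with
    | some kv => some kv.1
    | none => aFallback rest row

def get_identity_key_py (area_name : String) (sample_row : List (String × String)) : Option String :=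
  if identityKeys.contains area_name then
    (identityKeys.get? area_name).getD none
  else
    aFallback ["Id", "id", "number"] sample_row

-- ===== PORT B =====
-- one pass over the row: index.setdefault(suffix, k) for each suffix k ends with
def bStep (d : PySem.Dict String String) (k : String) : PySem.Dict String String :=
  ["Id", "id", "number"].foldl
    (fun d s => if PySem.Str.endswith k s then d.setdefault s k else d) d

-- selection: for suffix in (...): if suffix in index: return index[suffix]
def bSelect : List String → PySem.Dict String String → Option String
  | [], _ => none
  | s :: rest, d =>
    match d.get? s with
    | some v => some v
    | none => bSelect rest d

def get_identity_key_py_alt (area_name : String) (sample_row : List (String × String)) : Option String :=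
  if identityKeys.contains area_name then
    (identityKeys.get? area_name).getD none
  else
    bSelect ["Id", "id", "number"] (sample_row.foldl (fun d kv => bStep d kv.1) PySem.Dict.empty)

-- ===== PRECONDITION & SPEC =====
def Spec_get_identity_key_py (area_name : String) (sample_row : List (String × String)) (out : Option String) : Prop := out = get_identity_key_py_alt area_name sample_row
instance (area_name : String) (sample_row : List (String × String)) (out : Option String) : Decidable (Spec_get_identity_key_py area_name sample_row out) := by unfold Spec_get_identity_key_py; infer_instance

-- ===== CLAIM (what is proved, stated in full; the proofs are below) =====
def Claim_equal_get_identity_key_py : Prop := ∀ (area_name : String) (sample_row : List (String × String)), Dom_get_identity_key_py area_name sample_row → Spec_get_identity_key_py area_name sample_row (get_identity_key_py area_name sample_row)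

-- ===== LEMMAS AND PROOFS =====

-- effect of one bStep on the entry for one of the three suffixes
theorem bStep_get? (d : PySem.Dict String String) (k s : String)
    (hs : s = "Id" ∨ s = "id" ∨ s = "number") :
    (bStep d k).get? s =
      ((d.get? s).or (if PySem.Str.endswith k s then some k else none)) := by
  rcases hs with h | h | h <;> subst h <;>
    simp only [bStep, List.foldl] <;>
    split_ifs <;>
    simp_all [PySem.Dict.get?_setdefault_self, PySem.Dict.get?_setdefault_of_ne,
      Option.or] <;>
    cases d.get? "Id" <;> cases d.get? "id" <;> cases d.get? "number" <;> simp_all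

-- after the whole pass, the entry for a suffix is the first key of the row ending with it
theorem fold_get? (row : List (String × String)) (d : PySem.Dict String String)
    (s : String) (hs : s = "Id" ∨ s = "id" ∨ s = "number") :
    (row.foldl (fun d kv => bStep d kv.1) d).get? s =
      ((d.get? s).or ((row.find? (fun kv => PySem.Str.endswith kv.1 s)).map (·.1))) := by
  induction row generalizing d with
  | nil => simp
  | cons kv rest ih =>
    simp only [List.foldl, List.find?]
    rw [ih, bStep_get? d kv.1 s hs]
    cases h : PySem.Str.endswith kv.1 s <;>
      cases hd : d.get? s <;> simp [Option.or]

theorem fallback_eq (row : List (String × String)) :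
    aFallback ["Id", "id", "number"] row =
      bSelect ["Id", "id", "number"] (row.foldl (fun d kv => bStep d kv.1) PySem.Dict.empty) := by
  simp only [aFallback, bSelect]
  rw [fold_get? row PySem.Dict.empty "Id" (by simp),
      fold_get? row PySem.Dict.empty "id" (by simp),
      fold_get? row PySem.Dict.empty "number" (by simp)]
  cases h1 : row.find? (fun kv => PySem.Str.endswith kv.1 "Id") <;>
    cases h2 : row.find? (fun kv => PySem.Str.endswith kv.1 "id") <;>
      cases h3 : row.find? (fun kv => PySem.Str.endswith kv.1 "number") <;>
        simp [PySem.Dict.get?, PySem.Dict.empty, Option.or]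

-- ===== VERDICT (by name: the statement is the Claim_ definition above) =====
theorem get_identity_key_py_spec : Claim_equal_get_identity_key_py := by
  intro area_name sample_row _
  unfold Spec_get_identity_key_py get_identity_key_py get_identity_key_py_alt
  split_ifs with h
  · rfl
  · exact fallback_eq sample_row
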